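-- pv_equiv track=rewrite | github.com/dudqo225/TIL | algorithm/swea/1221_GNS/s1.py | strNumberSort
-- ===== SOURCE A (Python) =====
-- def strNumberSort(arr):
--
--     # str 숫자를 int 숫자로 바꾸기
--     num_list = []
--     for i in arr:
--         if i == 'ZRO':
--             num_list.append(0)
--         elif i == 'ONE':
--             num_list.append(1)
--         elif i == 'TWO':
--             num_list.append(2)
--         elif i == 'THR':
--             num_list.append(3)
--         elif i == 'FOR':
--             num_list.append(4)
--         elif i == 'FIV':
--             num_list.append(5)
--         elif i == 'SIX':
--             num_list.append(6)
--         elif i == 'SVN':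
--             num_list.append(7)
--         elif i == 'EGT':
--             num_list.append(8)
--         elif i == 'NIN':
--             num_list.append(9)
--
--     # 숫자 정렬하기
--     for i in range(len(num_list)-1, 0, -1):
--         for j in range(0, i):
--             if num_list[j] > num_list[j+1]:
--                 num_list[j], num_list[j+1] = num_list[j+1], num_list[j]
--
--     # int 숫자를 다시 str 숫자로 바꾸기
--     result = []
--     for num in num_list:
--         if num == 0:
--             result.append('ZRO')
--         elif num == 1:
--             result.append('ONE')
--         elif num == 2:
--             result.append('TWO')
--         elif num == 3:
--             result.append('THR')
--         elif num == 4: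
--             result.append('FOR')
--         elif num == 5:
--             result.append('FIV')
--         elif num == 6:
--             result.append('SIX')
--         elif num == 7:
--             result.append('SVN')
--         elif num == 8:
--             result.append('EGT')
--         elif num == 9:
--             result.append('NIN')
--
--     return result
-- ===== SOURCE B (Python) =====
-- WORDS = ['ZRO', 'ONE', 'TWO', 'THR', 'FOR', 'FIV', 'SIX', 'SVN', 'EGT', 'NIN']
--
-- def strNumberSort(arr):
--     # counting sort over the 10 fixed digit words: O(n) instead of bubble sort
--     counts = {w: 0 for w in WORDS}
--     for s in arr:
--         if s in counts:
--             counts[s] += 1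
--     out = []
--     for w in WORDS:
--         out.extend([w] * counts[w])
--     return out
-- ===== Notes on version B (the rewrite author's own statement) =====
-- stated objective: faster
-- what changed: Replaces translate-to-ints + in-place bubble sort + translate-back with a single counting pass over the 10 fixed digit words, emitting each word repeated by its count.
import Mathlib
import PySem

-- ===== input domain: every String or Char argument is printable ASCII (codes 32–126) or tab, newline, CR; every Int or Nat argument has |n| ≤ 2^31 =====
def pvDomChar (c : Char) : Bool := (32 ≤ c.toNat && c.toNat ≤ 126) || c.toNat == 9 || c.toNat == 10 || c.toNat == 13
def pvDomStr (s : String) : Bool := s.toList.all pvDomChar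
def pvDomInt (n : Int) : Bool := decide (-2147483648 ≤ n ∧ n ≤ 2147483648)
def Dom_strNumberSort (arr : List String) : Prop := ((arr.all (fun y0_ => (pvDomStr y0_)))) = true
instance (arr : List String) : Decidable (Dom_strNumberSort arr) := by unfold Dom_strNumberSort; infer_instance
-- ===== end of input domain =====

-- B changes the algorithm: one counting pass over the 10 fixed digit words instead of
-- translate-to-ints + bubble sort + translate-back (O(n) vs O(n^2)).

-- ===== PORT A =====
-- first loop's if/elif chain: word -> digit (none = no branch fires, nothing appended)
def toNum? (s : String) : Option Nat :=
  if s = "ZRO" then some 0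
  else if s = "ONE" then some 1
  else if s = "TWO" then some 2
  else if s = "THR" then some 3
  else if s = "FOR" then some 4
  else if s = "FIV" then some 5
  else if s = "SIX" then some 6
  else if s = "SVN" then some 7
  else if s = "EGT" then some 8
  else if s = "NIN" then some 9
  else none

-- first loop: build num_list
def toNums : List String → List Nat
  | [] => []
  | s :: t =>
    match toNum? s with
    | some n => n :: toNums t
    | none => toNums t

-- inner loop 'for j in range(0, i)': c adjacent compare-and-swap steps from the left
def passA : Nat → List Nat → List Nat
  | 0, L => L
  | _ + 1, [] => []
  | _ + 1, [x] => [x]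
  | c + 1, x :: y :: t => if x > y then y :: passA c (x :: t) else x :: passA c (y :: t)

-- outer loop 'for i in range(len(num_list)-1, 0, -1)'
def bubbleA : Nat → List Nat → List Nat
  | 0, L => L
  | i + 1, L => bubbleA i (passA (i + 1) L)

-- last loop's if/elif chain: digit -> word
def toWord? (n : Nat) : Option String :=
  if n = 0 then some "ZRO"
  else if n = 1 then some "ONE"
  else if n = 2 then some "TWO"
  else if n = 3 then some "THR"
  else if n = 4 then some "FOR"
  else if n = 5 then some "FIV"
  else if n = 6 then some "SIX"
  else if n = 7 then some "SVN"
  else if n = 8 then some "EGT"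
  else if n = 9 then some "NIN"
  else none

-- last loop: build result
def fromNums : List Nat → List String
  | [] => []
  | n :: t =>
    match toWord? n with
    | some w => w :: fromNums t
    | none => fromNums t

def strNumberSort (arr : List String) : List String :=
  let numList := toNums arr
  fromNums (bubbleA (numList.length - 1) numList)

-- ===== PORT B =====
def pvWORDS : List String := ["ZRO", "ONE", "TWO", "THR", "FOR", "FIV", "SIX", "SVN", "EGT", "NIN"]

def strNumberSort_alt (arr : List String) : List String :=
  pvWORDS.flatMap (fun w => List.replicate (List.count w arr) w)

-- ===== PRECONDITION & SPEC =====
def Spec_strNumberSort (arr : List String) (out : List String) : Prop := out = strNumberSort_alt arr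
instance (arr : List String) (out : List String) : Decidable (Spec_strNumberSort arr out) := by unfold Spec_strNumberSort; infer_instance

-- ===== CLAIM (what is proved, stated in full; the proofs are below) =====
def Claim_equal_strNumberSort : Prop := ∀ (arr : List String), Dom_strNumberSort arr → Spec_strNumberSort arr (strNumberSort arr)

-- ===== LEMMAS AND PROOFS =====

-- digit -> word as a total function (proof-side only)
def pvWORD (d : Nat) : String := (toWord? d).getD ""

-- a full left-to-right pass of adjacent compare-and-swaps (enough steps to reach the end)
def passF : List Nat → List Nat
  | [] => []
  | [x] => [x]
  | x :: y :: t => if x > y then y :: passF (x :: t) else x :: passF (y :: t)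

theorem passF_perm : ∀ L : List Nat, (passF L).Perm L := by
  intro L
  fun_induction passF with
  | case1 => exact List.Perm.refl _
  | case2 x => exact List.Perm.refl _
  | case3 x y t h ih =>
      exact (ih.cons y).trans (List.Perm.swap x y t)
  | case4 x y t h ih =>
      exact ih.cons x

theorem passF_max : ∀ L : List Nat, L ≠ [] → ∃ M m, passF L = M ++ [m] ∧ M.length + 1 = L.length ∧ ∀ x ∈ L, x ≤ m := by
  intro L
  fun_induction passF with
  | case1 => intro h; exact absurd rfl h
  | case2 x => intro _; exact ⟨[], x, rfl, rfl, by simp⟩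
  | case3 x y t h ih =>
      intro _
      obtain ⟨M, m, hM, hlen, hmax⟩ := ih (by simp)
      refine ⟨y :: M, m, ?_, ?_, ?_⟩
      · simp [passF, if_pos h, hM]
      · simp at hlen ⊢; omega
      · intro z hz
        simp only [List.mem_cons] at hz
        rcases hz with rfl | rfl | hz
        · exact hmax z (by simp)
        · exact le_trans (le_of_lt h) (hmax x (by simp))
        · exact hmax z (by simp [hz])
  | case4 x y t h ih =>
      intro _
      obtain ⟨M, m, hM, hlen, hmax⟩ := ih (by simp)
      refine ⟨x :: M, m, ?_, ?_, ?_⟩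
      · simp [passF, if_neg h, hM]
      · simp at hlen ⊢; omega
      · intro z hz
        simp only [List.mem_cons] at hz
        rcases hz with rfl | rfl | hz
        · exact le_trans (not_lt.mp h) (hmax y (by simp))
        · exact hmax z (by simp)
        · exact hmax z (by simp [hz])

theorem passA_split : ∀ (c : Nat) (L : List Nat), passA c L = passF (L.take (c + 1)) ++ L.drop (c + 1) := by
  intro c
  induction c with
  | zero =>
      intro L
      cases L with
      | nil => simp [passA, passF]
      | cons x t => simp [passA, passF]
  | succ c ih =>
      intro L
      match L with
      | [] => simp [passA, passF]
      | [x] => simp [passA, passF]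
      | x :: y :: t =>
          simp only [passA]
          by_cases h : x > y
          · simp only [if_pos h, ih (x :: t)]
            simp [List.take_succ_cons, List.drop_succ_cons, passF, if_pos h]
          · simp only [if_neg h, ih (y :: t)]
            simp [List.take_succ_cons, List.drop_succ_cons, passF, if_neg h]

theorem passA_perm (c : Nat) (L : List Nat) : (passA c L).Perm L := by
  rw [passA_split]
  calc (passF (L.take (c+1)) ++ L.drop (c+1)).Perm (L.take (c+1) ++ L.drop (c+1)) :=
        (passF_perm _).append_right _
    _ = L := List.take_append_drop _ _

-- loop invariant of the outer bubble loop
def pvJ (k : Nat) (L : List Nat) : Prop :=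
  List.Sorted (· ≤ ·) (L.drop k) ∧ ∀ p ∈ L.take k, ∀ q ∈ L.drop k, p ≤ q

theorem pass_step (c : Nat) (L : List Nat) (h : pvJ (c + 1) L) : pvJ c (passA c L) := by
  obtain ⟨hs, hd⟩ := h
  rw [passA_split]
  by_cases hlen : L.length ≤ c
  · have h1 : (passF (L.take (c+1)) ++ L.drop (c+1)).length ≤ c := by
      have hpl := (passF_perm (L.take (c+1))).length_eq
      simp only [List.length_append, hpl, List.length_take, List.length_drop]
      omega
    constructor
    · rw [List.drop_eq_nil_of_le h1]; exact List.sorted_nil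
    · intro p _ q hq
      rw [List.drop_eq_nil_of_le h1] at hq
      simp at hq
  · push_neg at hlen
    have htne : L.take (c+1) ≠ [] := by
      intro hnil
      have hln := congrArg List.length hnil
      simp only [List.length_take, List.length_nil] at hln
      omega
    obtain ⟨M, m, hM, hMl, hmax⟩ := passF_max (L.take (c+1)) htne
    have hMlen : M.length = c := by
      have : (L.take (c+1)).length = c + 1 := by
        simp only [List.length_take]; omega
      omega
    have hmem : ∀ x ∈ M ++ [m], x ∈ L.take (c+1) := by
      intro x hx
      exact (hM ▸ (passF_perm (L.take (c+1)))).mem_iff.mp hx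
    rw [hM]
    have hre : M ++ [m] ++ L.drop (c+1) = M ++ (m :: L.drop (c+1)) := by simp
    rw [hre]
    have hdropc : (M ++ (m :: L.drop (c+1))).drop c = m :: L.drop (c+1) := by
      rw [← hMlen, List.drop_left]
    have htakec : (M ++ (m :: L.drop (c+1))).take c = M := by
      rw [← hMlen, List.take_left]
    constructor
    · rw [hdropc]
      refine List.sorted_cons.mpr ⟨?_, hs⟩
      intro q hq
      exact hd m (hmem m (by simp)) q hq
    · intro p hp q hq
      rw [htakec] at hp
      rw [hdropc] at hq
      simp only [List.mem_cons] at hq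
      rcases hq with rfl | hq
      · exact hmax p (hmem p (by simp [hp]))
      · exact hd p (hmem p (by simp [hp])) q hq

theorem bubble_sorted : ∀ (i : Nat) (L : List Nat), pvJ (i + 1) L → List.Sorted (· ≤ ·) (bubbleA i L) := by
  intro i
  induction i with
  | zero =>
      intro L h
      obtain ⟨hs, hd⟩ := h
      cases L with
      | nil => exact List.sorted_nil
      | cons x t =>
          simp only [bubbleA]
          refine List.sorted_cons.mpr ⟨?_, by simpa using hs⟩
          intro q hq
          exact hd x (by simp) q (by simpa using hq)
  | succ i ih =>
      intro L h
      exact ih (passA (i + 1) L) (pass_step (i + 1) L h)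

theorem bubble_perm : ∀ (i : Nat) (L : List Nat), (bubbleA i L).Perm L := by
  intro i
  induction i with
  | zero => intro L; rfl
  | succ i ih => intro L; exact (ih (passA (i+1) L)).trans (passA_perm (i+1) L)

theorem bubble_sorted_top (L : List Nat) : List.Sorted (· ≤ ·) (bubbleA (L.length - 1) L) := by
  apply bubble_sorted
  constructor
  · rw [List.drop_eq_nil_of_le (by omega)]; exact List.sorted_nil
  · intro p _ q hq
    rw [List.drop_eq_nil_of_le (by omega)] at hq
    simp at hq

-- blocks of replicates over an ordered index list are sorted
theorem sorted_blocks (f : Nat → Nat) : ∀ l : List Nat, l.Pairwise (· ≤ ·) →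
    List.Sorted (· ≤ ·) (l.flatMap fun d => List.replicate (f d) d) := by
  intro l
  induction l with
  | nil => intro _; exact List.sorted_nil
  | cons d l ih =>
      intro h
      rw [List.pairwise_cons] at h
      rw [List.flatMap_cons]
      rw [List.Sorted, List.pairwise_append]
      refine ⟨List.pairwise_replicate.mpr (Or.inr le_rfl), ih h.2, ?_⟩
      intro x hx y hy
      rw [List.eq_of_mem_replicate hx]
      simp only [List.mem_flatMap] at hy
      obtain ⟨d', hd', hy⟩ := hy
      rw [List.eq_of_mem_replicate hy]
      exact h.1 d' hd'

theorem count_blocks (f : Nat → Nat) : ∀ (l : List Nat), l.Nodup → ∀ v : Nat,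
    (l.flatMap fun d => List.replicate (f d) d).count v = if v ∈ l then f v else 0 := by
  intro l
  induction l with
  | nil => intro _ v; simp
  | cons d l ih =>
      intro hnd v
      rw [List.nodup_cons] at hnd
      rw [List.flatMap_cons, List.count_append, ih hnd.2 v, List.count_replicate]
      by_cases hv : v = d
      · subst hv
        simp [hnd.1]
      · simp [hv, Ne.symm hv]

-- a sorted list of digits < 10 is exactly its counting-sort normal form
theorem sorted_eq_blocks (L : List Nat) (hs : List.Sorted (· ≤ ·) L) (hlt : ∀ x ∈ L, x < 10) :
    L = (List.range 10).flatMap fun d => List.replicate (L.count d) d := by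
  have hperm : L.Perm ((List.range 10).flatMap fun d => List.replicate (L.count d) d) := by
    rw [List.perm_iff_count]
    intro v
    rw [count_blocks _ _ (List.nodup_range) v]
    by_cases hv : v < 10
    · simp [List.mem_range, hv]
    · rw [if_neg (by simpa using hv)]
      exact List.count_eq_zero.mpr (fun hmem => hv (hlt v hmem))
  exact List.Perm.eq_of_pairwise (fun a b _ _ h1 h2 => le_antisymm h1 h2) hs
    (sorted_blocks _ _ (by decide)) hperm

theorem toNum?_lt (s : String) (n : Nat) (h : toNum? s = some n) : n < 10 := by
  unfold toNum? at h
  split_ifs at h <;> simp_all <;> omega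

theorem toNums_lt (arr : List String) : ∀ x ∈ toNums arr, x < 10 := by
  induction arr with
  | nil => simp [toNums]
  | cons s t ih =>
      simp only [toNums]
      cases h : toNum? s with
      | none => exact ih
      | some n =>
          intro x hx
          simp only [List.mem_cons] at hx
          rcases hx with rfl | hx
          · exact toNum?_lt s x h
          · exact ih x hx

theorem pvWORD_inj : ∀ d < 10, ∀ n < 10, pvWORD d = pvWORD n → d = n := by decide

theorem toNum?_some_char (s : String) (n : Nat) (h : toNum? s = some n) :
    n < 10 ∧ s = pvWORD n := by
  unfold toNum? at h
  split_ifs at h with h0 h1 h2 h3 h4 h5 h6 h7 h8 h9 <;>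
    (injection h with h'; subst h') <;> simp_all [pvWORD, toWord?]

theorem count_toNums (d : Nat) (hd : d < 10) : ∀ arr : List String,
    (toNums arr).count d = arr.count (pvWORD d) := by
  intro arr
  induction arr with
  | nil => simp [toNums]
  | cons s t ih =>
      cases h : toNum? s with
      | none =>
          have hne : s ≠ pvWORD d := by
            unfold toNum? at h
            split_ifs at h with h0 h1 h2 h3 h4 h5 h6 h7 h8 h9
            interval_cases d <;> simp_all [pvWORD, toWord?]
          simp only [toNums, h]
          simp [ih, hne]
      | some n =>
          obtain ⟨hn, hs⟩ := toNum?_some_char s n h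
          simp only [toNums, h, List.count_cons, ih]
          congr 1
          by_cases hdn : n = d
          · subst hdn; simp [hs]
          · have hws : pvWORD d ≠ s := by
              rw [hs]
              intro heq
              exact hdn (pvWORD_inj n hn d hd heq.symm)
            simp [hdn, Ne.symm hws]

theorem fromNums_append (a b : List Nat) : fromNums (a ++ b) = fromNums a ++ fromNums b := by
  induction a with
  | nil => simp [fromNums]
  | cons n t ih =>
      simp only [List.cons_append, fromNums]
      cases toWord? n <;> simp [ih]

theorem fromNums_replicate (k d : Nat) (hd : d < 10) :
    fromNums (List.replicate k d) = List.replicate k (pvWORD d) := by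
  induction k with
  | zero => rfl
  | succ k ih =>
      have hw : toWord? d = some (pvWORD d) := by interval_cases d <;> rfl
      simp only [List.replicate_succ, fromNums, hw, ih]

theorem pvWORDS_eq : pvWORDS = (List.range 10).map pvWORD := by decide

theorem fromNums_blocks (arr : List String) : ∀ l : List Nat, (∀ d ∈ l, d < 10) →
    fromNums (l.flatMap fun d => List.replicate ((toNums arr).count d) d)
      = l.flatMap fun d => List.replicate (List.count (pvWORD d) arr) (pvWORD d) := by
  intro l
  induction l with
  | nil => intro _; rfl
  | cons d l ih =>
      intro h
      have hd : d < 10 := h d (by simp)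
      simp only [List.flatMap_cons, fromNums_append, ih (fun d' hd' => h d' (by simp [hd']))]
      rw [fromNums_replicate _ _ hd, count_toNums d hd arr]

theorem strNumberSort_eq (arr : List String) : strNumberSort arr = strNumberSort_alt arr := by
  have h0 : strNumberSort arr
      = fromNums (bubbleA ((toNums arr).length - 1) (toNums arr)) := rfl
  rw [h0]
  set nums := toNums arr with hnums
  set B := bubbleA (nums.length - 1) nums with hB
  have hlt : ∀ x ∈ B, x < 10 := by
    intro x hx
    exact toNums_lt arr x ((bubble_perm _ _).mem_iff.mp hx)
  have hcountB : ∀ v, B.count v = nums.count v := fun v => (bubble_perm _ _).count_eq v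
  have hBeq : B = (List.range 10).flatMap fun d => List.replicate (nums.count d) d := by
    have := sorted_eq_blocks B (bubble_sorted_top nums) hlt
    simpa [hcountB] using this
  rw [hBeq, hnums, fromNums_blocks arr (List.range 10) (by simp)]
  unfold strNumberSort_alt
  rw [pvWORDS_eq, List.flatMap_map]

-- ===== VERDICT (by name: the statement is the Claim_ definition above) =====
theorem strNumberSort_spec : Claim_equal_strNumberSort := by
  intro arr _
  unfold Spec_strNumberSort
  exact strNumberSort_eq arr
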